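-- pv_equiv track=rewrite | github.com/TalmudLab/talmud-word-translation | align_and_classify.py | label_pages
-- ===== SOURCE A (Python) =====
-- def label_pages(mas):
--     num = 2
--     amud = 'a'
--     for p in range(len(mas)):
--         mas[p] = {'page': str(num) + amud, 'content': mas[p]}
--         if amud == 'a':
--             amud = 'b'
--         else:
--             amud = 'a'
--             num += 1
--     return mas
-- ===== SOURCE B (Python) =====
-- def label_pages(mas):
--     for p in range(len(mas)):
--         mas[p] = {'page': str(2 + p // 2) + ('a' if p % 2 == 0 else 'b'),
--                   'content': mas[p]}
--     return mas
-- ===== Notes on version B (the rewrite author's own statement) =====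
-- stated objective: simpler
-- what changed: Dropped the threaded num/amud state variables; each label is computed directly from the index as 2+p//2 and 'a'/'b' from p%2.
import Mathlib
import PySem

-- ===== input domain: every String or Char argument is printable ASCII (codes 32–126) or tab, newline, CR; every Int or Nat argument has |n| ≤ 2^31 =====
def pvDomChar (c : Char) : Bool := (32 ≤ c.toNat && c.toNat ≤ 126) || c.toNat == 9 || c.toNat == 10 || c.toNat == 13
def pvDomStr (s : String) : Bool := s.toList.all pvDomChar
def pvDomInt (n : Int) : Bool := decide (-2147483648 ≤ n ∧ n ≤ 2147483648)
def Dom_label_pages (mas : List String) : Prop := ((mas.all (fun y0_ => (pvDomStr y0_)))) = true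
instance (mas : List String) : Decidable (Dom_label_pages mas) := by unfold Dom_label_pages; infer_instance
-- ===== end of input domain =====

-- B drops A's threaded num/amud state: each page label is computed directly from the index (2 + p//2, 'a'/'b' from p%2); objective: simpler.


-- ===== PORT A =====
def labelGoA : List String → Int → String → List (List (String × String))
  | [], _, _ => []
  | x :: xs, num, amud =>
    [("page", PySem.Int.toStr num ++ amud), ("content", x)] ::
      (if amud == "a" then labelGoA xs num "b" else labelGoA xs (num + 1) "a")

def label_pages (mas : List String) : List (List (String × String)) :=
  labelGoA mas 2 "a"

-- ===== PORT B =====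
def label_pages_alt (mas : List String) : List (List (String × String)) :=
  (mas.zipIdx).map (fun pr =>
    [("page", PySem.Int.toStr (2 + PySem.Int.floordiv (pr.2 : Int) 2) ++
        (if PySem.Int.mod (pr.2 : Int) 2 = 0 then "a" else "b")),
     ("content", pr.1)])

-- ===== PRECONDITION & SPEC =====
def Spec_label_pages (mas : List String) (out : List (List (String × String))) : Prop := out = label_pages_alt mas
instance (mas : List String) (out : List (List (String × String))) : Decidable (Spec_label_pages mas out) := by unfold Spec_label_pages; infer_instance

-- ===== CLAIM (what is proved, stated in full; the proofs are below) =====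
def Claim_equal_label_pages : Prop := ∀ (mas : List String), Dom_label_pages mas → Spec_label_pages mas (label_pages mas)

-- ===== LEMMAS AND PROOFS =====

-- key invariant: A's running (num, amud) state equals the closed form at index p
theorem labelGoA_closed (xs : List String) : ∀ (p : Nat),
    labelGoA xs (2 + (p / 2 : Nat)) (if p % 2 = 0 then "a" else "b") =
      (xs.zipIdx p).map (fun pr =>
        [("page", PySem.Int.toStr (2 + PySem.Int.floordiv (pr.2 : Int) 2) ++
            (if PySem.Int.mod (pr.2 : Int) 2 = 0 then "a" else "b")),
         ("content", pr.1)]) := by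
  induction xs with
  | nil => intro p; simp [labelGoA]
  | cons x xs ih =>
    intro p
    rcases Nat.even_or_odd p with ⟨k, hk⟩ | ⟨k, hk⟩
    · have h2 : p % 2 = 0 := by omega
      have h3 : p / 2 = k := by omega
      have h4 : (p+1) / 2 = k := by omega
      have h5 : (p+1) % 2 = 1 := by omega
      have ihp := ih (p+1)
      rw [h4, h5] at ihp
      simp only [labelGoA, h2, h3, List.zipIdx_cons, List.map_cons]
      refine List.cons_eq_cons.mpr ⟨?_, ?_⟩
      · have : PySem.Int.floordiv (p : Int) 2 = ((p / 2 : Nat) : Int) := by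
          exact_mod_cast PySem.Int.floordiv_natCast p 2
        have hm : PySem.Int.mod (p : Int) 2 = ((p % 2 : Nat) : Int) := by
          exact_mod_cast PySem.Int.mod_natCast p 2
        rw [this, hm, h2, h3]
        simp
      · simpa using ihp
    · have h2 : p % 2 = 1 := by omega
      have h3 : p / 2 = k := by omega
      have h4 : (p+1) / 2 = k + 1 := by omega
      have h5 : (p+1) % 2 = 0 := by omega
      have ihp := ih (p+1)
      rw [h4, h5] at ihp
      simp only [labelGoA, h2, h3, List.zipIdx_cons, List.map_cons]
      refine List.cons_eq_cons.mpr ⟨?_, ?_⟩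
      · have : PySem.Int.floordiv (p : Int) 2 = ((p / 2 : Nat) : Int) := by
          exact_mod_cast PySem.Int.floordiv_natCast p 2
        have hm : PySem.Int.mod (p : Int) 2 = ((p % 2 : Nat) : Int) := by
          exact_mod_cast PySem.Int.mod_natCast p 2
        rw [this, hm, h2, h3]
        simp
      · have : ((2 : Int) + (k : Int)) + 1 = 2 + ((k + 1 : Nat) : Int) := by push_cast; ring
        rw [if_neg Nat.one_ne_zero, if_neg (by decide : ¬ (("b" == "a") = true)), this]
        simpa using ihp

-- ===== VERDICT (by name: the statement is the Claim_ definition above) =====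
theorem label_pages_spec : Claim_equal_label_pages := by
  intro mas _
  unfold Spec_label_pages label_pages label_pages_alt
  simpa using labelGoA_closed mas 0
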